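-- pv_equiv track=rewrite | github.com/nestor-e/490-DataParser | LemCompare.py | matchCount
-- ===== SOURCE A (Python) =====
-- def matchCount(names, lemPN, lemGN, lemOTHER):
--     (matchPN, matchGN, matchOTHER, matchMulti, matchNONE) = (0, 0, 0, 0, 0)
--     for name in names:
--         matchCount = 0
--         if name in lemPN:
--             matchPN    += 1
--             matchCount += 1
--         if name in lemGN:
--             matchGN    += 1
--             matchCount += 1
--         if name in lemOTHER:
--             matchOTHER += 1
--             matchCount += 1
--         if matchCount > 1:
--             matchMulti += 1
--         elif matchCount < 1:
--             matchNONE += 1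
--     return (matchPN, matchGN, matchOTHER, matchMulti, matchNONE)
-- ===== SOURCE B (Python) =====
-- def matchCount(names, lemPN, lemGN, lemOTHER):
--     matchPN    = sum(1 for n in names if n in lemPN)
--     matchGN    = sum(1 for n in names if n in lemGN)
--     matchOTHER = sum(1 for n in names if n in lemOTHER)
--     hits = lambda n: (n in lemPN) + (n in lemGN) + (n in lemOTHER)
--     matchMulti = sum(1 for n in names if hits(n) > 1)
--     matchNONE  = sum(1 for n in names if hits(n) < 1)
--     return (matchPN, matchGN, matchOTHER, matchMulti, matchNONE)
-- ===== Notes on version B (the rewrite author's own statement) =====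
-- stated objective: alternative
-- what changed: Replaces A's single accumulating loop over five counters with five independent membership-count reductions over names (three category counts plus two passes tallying per-name combined hit counts for multi/none).
import Mathlib
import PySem

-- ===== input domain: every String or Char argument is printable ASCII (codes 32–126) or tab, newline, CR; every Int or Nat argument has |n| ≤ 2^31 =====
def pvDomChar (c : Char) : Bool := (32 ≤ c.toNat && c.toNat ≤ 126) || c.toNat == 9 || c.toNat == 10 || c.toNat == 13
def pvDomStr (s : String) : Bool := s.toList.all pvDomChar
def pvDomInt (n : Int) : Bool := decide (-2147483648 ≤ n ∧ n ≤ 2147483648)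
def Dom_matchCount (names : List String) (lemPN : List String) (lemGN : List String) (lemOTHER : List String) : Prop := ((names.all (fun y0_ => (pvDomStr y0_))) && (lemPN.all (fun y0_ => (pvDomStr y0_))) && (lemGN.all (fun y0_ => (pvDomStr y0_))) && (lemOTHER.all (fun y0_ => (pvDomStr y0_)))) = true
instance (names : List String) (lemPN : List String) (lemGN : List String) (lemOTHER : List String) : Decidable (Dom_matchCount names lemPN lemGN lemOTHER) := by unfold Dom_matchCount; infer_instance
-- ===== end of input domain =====

-- B replaces A's single five-counter loop by five independent membership-count reductions (alternative decomposition, same cost).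

-- ===== PORT A =====
-- one iteration of A's loop body over the state (matchPN, matchGN, matchOTHER, matchMulti, matchNONE)
def matchStepA (lemPN lemGN lemOTHER : List String) (st : Int × Int × Int × Int × Int) (name : String) : Int × Int × Int × Int × Int :=
  let (mPN, mGN, mOT, mMulti, mNone) := st
  let c : Int := 0
  let (mPN, c) := if lemPN.contains name then (mPN + 1, c + 1) else (mPN, c)
  let (mGN, c) := if lemGN.contains name then (mGN + 1, c + 1) else (mGN, c)
  let (mOT, c) := if lemOTHER.contains name then (mOT + 1, c + 1) else (mOT, c)
  if c > 1 then (mPN, mGN, mOT, mMulti + 1, mNone)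
  else if c < 1 then (mPN, mGN, mOT, mMulti, mNone + 1)
  else (mPN, mGN, mOT, mMulti, mNone)

def matchCount (names : List String) (lemPN : List String) (lemGN : List String) (lemOTHER : List String) : List Int :=
  let s := names.foldl (matchStepA lemPN lemGN lemOTHER) (0, 0, 0, 0, 0)
  [s.1, s.2.1, s.2.2.1, s.2.2.2.1, s.2.2.2.2]

-- ===== PORT B =====
-- per-name combined hit count (Source B's `hits`)
def matchHits (lemPN lemGN lemOTHER : List String) (n : String) : Nat :=
  (if lemPN.contains n then 1 else 0) + (if lemGN.contains n then 1 else 0) + (if lemOTHER.contains n then 1 else 0)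

def matchCount_alt (names : List String) (lemPN : List String) (lemGN : List String) (lemOTHER : List String) : List Int :=
  [ (names.countP (fun n => lemPN.contains n) : Nat),
    (names.countP (fun n => lemGN.contains n) : Nat),
    (names.countP (fun n => lemOTHER.contains n) : Nat),
    (names.countP (fun n => matchHits lemPN lemGN lemOTHER n > 1) : Nat),
    (names.countP (fun n => matchHits lemPN lemGN lemOTHER n < 1) : Nat) ]

-- ===== PRECONDITION & SPEC =====
def Spec_matchCount (names : List String) (lemPN : List String) (lemGN : List String) (lemOTHER : List String) (out : List Int) : Prop := out = matchCount_alt names lemPN lemGN lemOTHER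
instance (names : List String) (lemPN : List String) (lemGN : List String) (lemOTHER : List String) (out : List Int) : Decidable (Spec_matchCount names lemPN lemGN lemOTHER out) := by unfold Spec_matchCount; infer_instance

-- ===== CLAIM (what is proved, stated in full; the proofs are below) =====
def Claim_equal_matchCount : Prop := ∀ (names : List String) (lemPN : List String) (lemGN : List String) (lemOTHER : List String), Dom_matchCount names lemPN lemGN lemOTHER → Spec_matchCount names lemPN lemGN lemOTHER (matchCount names lemPN lemGN lemOTHER)

-- ===== LEMMAS AND PROOFS =====
theorem matchFold_invariant (lemPN lemGN lemOTHER : List String) (names : List String) :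
    ∀ st : Int × Int × Int × Int × Int,
      names.foldl (matchStepA lemPN lemGN lemOTHER) st =
        (st.1 + (names.countP (fun n => lemPN.contains n) : Nat),
         st.2.1 + (names.countP (fun n => lemGN.contains n) : Nat),
         st.2.2.1 + (names.countP (fun n => lemOTHER.contains n) : Nat),
         st.2.2.2.1 + (names.countP (fun n => matchHits lemPN lemGN lemOTHER n > 1) : Nat),
         st.2.2.2.2 + (names.countP (fun n => matchHits lemPN lemGN lemOTHER n < 1) : Nat)) := by
  induction names with
  | nil => intro st; simp
  | cons x xs ih =>
    intro st
    obtain ⟨a, b, c, d, e⟩ := st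
    rw [List.foldl_cons, ih]
    simp only [List.countP_cons, matchStepA, matchHits]
    by_cases h1 : x ∈ lemPN <;> by_cases h2 : x ∈ lemGN <;> by_cases h3 : x ∈ lemOTHER <;>
      simp [h1, h2, h3, Prod.ext_iff] <;> omega

-- ===== VERDICT (by name: the statement is the Claim_ definition above) =====
theorem matchCount_spec : Claim_equal_matchCount := by
  intro names lemPN lemGN lemOTHER _
  unfold Spec_matchCount matchCount matchCount_alt
  rw [matchFold_invariant]
  simp
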